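-- pv_equiv track=rewrite | github.com/broadinstitute/dig-bioindex | bioindex/lib/schema.py | _index_keys
-- ===== SOURCE A (Python) =====
-- def _index_keys(columns):
--     """
--     Take all the key columns and build a list of possible index
--     tuples that can arise from them.
--
--     For example, given the following schema: "varId|dbSNP,gene"
--     these are the possible index key lists:
--
--     [['varId', 'gene'],
--      ['dbSNP', 'gene']]
--     """
--     keys = [k.split('|') for k in columns]
--
--     # recursively go through the keys
--     def build_keys(primary, secondary):
--         for key in primary:
--             if len(secondary) == 0:
--                 yield [key]
--             else:
--                 for rest in build_keys(secondary[0], secondary[1:]):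
--                     yield [key, *rest]
--
--     # generate a list of all possible key tuples
--     return list(build_keys(keys[0], keys[1:])) if len(keys) > 0 else []
-- ===== SOURCE B (Python) =====
-- def _index_keys(columns):
--     keys = [k.split('|') for k in columns]
--     if not keys:
--         return []
--     result = [[]]
--     for group in keys:
--         result = [acc + [x] for acc in result for x in group]
--     return result
-- ===== Notes on version B (the rewrite author's own statement) =====
-- stated objective: simpler
-- what changed: Replaced the recursive generator over (primary, secondary-suffix) pairs by an iterative left-fold that extends a running list of partial key tuples group by group.
import Mathlib
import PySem

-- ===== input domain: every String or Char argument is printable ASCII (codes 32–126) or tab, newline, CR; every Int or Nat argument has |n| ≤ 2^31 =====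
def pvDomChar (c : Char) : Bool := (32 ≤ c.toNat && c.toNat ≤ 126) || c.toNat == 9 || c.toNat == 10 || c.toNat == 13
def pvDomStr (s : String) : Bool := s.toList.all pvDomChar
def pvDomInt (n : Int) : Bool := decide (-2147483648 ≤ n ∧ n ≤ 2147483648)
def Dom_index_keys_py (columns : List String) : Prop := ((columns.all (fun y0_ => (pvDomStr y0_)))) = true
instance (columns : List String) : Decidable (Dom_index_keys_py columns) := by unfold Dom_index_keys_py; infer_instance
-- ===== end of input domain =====

-- B replaces A's recursive generator over key-group suffixes by an iterative left-fold
-- extending a running list of partial key tuples; objective: simpler.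


-- ===== PORT A =====
-- build_keys(primary, secondary): for key in primary yield [key] (secondary empty) or [key,*rest]
def buildKeys : List String → List (List String) → List (List String)
  | primary, [] => primary.flatMap (fun key => [[key]])
  | primary, s0 :: srest =>
      primary.flatMap (fun key => (buildKeys s0 srest).map (fun rest => key :: rest))

def index_keys_py (columns : List String) : List (List String) :=
  let keys := columns.map (fun k => (PySem.Str.split? k "|").getD [])
  if keys.length > 0 then buildKeys keys.head! keys.tail! else []

-- ===== PORT B =====
-- B: iterative fold extending the running list of partial tuples, acc outer / x inner.
def index_keys_py_alt (columns : List String) : List (List String) :=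
  let keys := columns.map (fun k => (PySem.Str.split? k "|").getD [])
  if keys = [] then []
  else keys.foldl (fun (result : List (List String)) (group : List String) => result.flatMap (fun acc => group.map (fun x => acc ++ [x]))) [[]]

-- ===== PRECONDITION & SPEC =====
def Spec_index_keys_py (columns : List String) (out : List (List String)) : Prop := out = index_keys_py_alt columns
instance (columns : List String) (out : List (List String)) : Decidable (Spec_index_keys_py columns out) := by unfold Spec_index_keys_py; infer_instance

-- ===== CLAIM (what is proved, stated in full; the proofs are below) =====
def Claim_equal_index_keys_py : Prop := ∀ (columns : List String), Dom_index_keys_py columns → Spec_index_keys_py columns (index_keys_py columns)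

-- ===== LEMMAS AND PROOFS =====

-- reference product used to relate both ports
def prodR : List (List String) → List (List String)
  | [] => [[]]
  | g :: gs => g.flatMap (fun x => (prodR gs).map (fun r => x :: r))

theorem buildKeys_eq_prodR (s : List (List String)) : ∀ p, buildKeys p s = prodR (p :: s) := by
  induction s with
  | nil => intro p; simp [buildKeys, prodR]
  | cons s0 srest ih =>
      intro p
      simp [buildKeys, prodR, ih]

theorem foldl_step_eq (gs : List (List String)) :
    ∀ acc : List (List String),
      gs.foldl (fun (result : List (List String)) (group : List String) => result.flatMap (fun a => group.map (fun x => a ++ [x]))) acc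
        = acc.flatMap (fun a => (prodR gs).map (fun r => a ++ r)) := by
  induction gs with
  | nil => intro acc; simp [prodR]
  | cons g gs ih =>
      intro acc
      simp only [List.foldl_cons, ih, prodR]
      simp [List.flatMap_assoc, List.map_flatMap, List.flatMap_map, Function.comp_def]

-- ===== VERDICT (by name: the statement is the Claim_ definition above) =====
theorem index_keys_py_spec : Claim_equal_index_keys_py := by
  intro columns _
  unfold Spec_index_keys_py index_keys_py index_keys_py_alt
  cases columns with
  | nil => simp
  | cons c cs =>
      simp only [List.map_cons, List.length_cons, List.head!, List.tail!]
      rw [if_pos (by omega), if_neg (by simp)]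
      rw [buildKeys_eq_prodR, List.foldl_cons]
      rw [foldl_step_eq]
      simp [prodR, List.flatMap_map]
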